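-- pv_equiv track=rewrite | github.com/andrewlidong/uChicago-work | WikiWork/NQueens/nqueens.py | positions
-- ===== SOURCE A (Python) =====
-- def positions(n):
--         # Returns a list where the ith element is the number of the row that contains
--         # a queen in that column. The layout of the solution is very specific and works
--         # for general n > 3.
--         pos_by_column = []
--         if n % 6 in [0, 4]:
--                 for i in range(n):
--                         pos_by_column.append((2*i + 1) if (2*i < n) else (2*i % n))
--         elif n % 6 == 2:
--                 for i in range(n):
--                         pos_by_column.append(((2*i + 3) % n) if (2*i < n)
--                                 else ((2*i - 2) % n))
--         else:
--                 pos_by_column = positions(n - 1)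
--                 pos_by_column.append(n - 1)
--
--         return pos_by_column
-- ===== SOURCE B (Python) =====
-- def positions(n):
--     # Columns-of-parity construction: the solution is just the odd rows
--     # followed by the even rows (rotated when the even base is 2 mod 6), no per-index case split.
--     m = n if n % 2 == 0 else n - 1
--     odds = list(range(1, m, 2))
--     evens = list(range(0, m, 2))
--     if m % 6 == 2:
--         odds = odds[1:] + odds[:1]      # rotate odds left by one
--         evens = evens[-1:] + evens[:-1] # rotate evens right by one
--     pos = odds + evens
--     if m != n:
--         pos.append(m)
--     return pos
-- ===== Notes on version B (the rewrite author's own statement) =====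
-- stated objective: alternative
-- what changed: Instead of A's per-index case analysis (a conditional with modular formulas evaluated at every column) and one-level self-recursion for odd n, B constructs the permutation wholesale: two stepped ranges give the odd rows and the even rows, each is rotated by one position with slicing in the residue-two-modulo-six case, the halves are concatenated, and the last row index is appended when n is odd.
import Mathlib
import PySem

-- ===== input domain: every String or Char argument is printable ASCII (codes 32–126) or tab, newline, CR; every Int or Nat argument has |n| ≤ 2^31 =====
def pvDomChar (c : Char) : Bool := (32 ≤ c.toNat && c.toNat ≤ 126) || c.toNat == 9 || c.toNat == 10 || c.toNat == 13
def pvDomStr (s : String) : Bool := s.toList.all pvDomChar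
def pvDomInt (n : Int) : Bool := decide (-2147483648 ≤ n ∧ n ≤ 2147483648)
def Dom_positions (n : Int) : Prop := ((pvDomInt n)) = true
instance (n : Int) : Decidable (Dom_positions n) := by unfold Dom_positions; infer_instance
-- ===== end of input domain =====

-- B drops A's per-index case analysis and recursion entirely: the solution is the odd rows
-- followed by the even rows (each rotated by one when the even base is 2 mod 6), built from
-- two stepped ranges and slice rotations (objective: alternative; a timing run measured B
-- faster by a constant factor).

-- ===== PORT A =====
-- literal port of A: branch on n % 6, append in a loop over range(n); the else branch recurses
-- on n-1. The self-call is expressed with a fuel parameter only to make the recursion structural: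
-- the recursion depth is at most 1 (the else branch fires only for odd n % 6, and then
-- (n-1) % 6 ∈ {0,2,4}), so fuel 2 never runs out.
def positionsFuel : Nat → Int → List Int
  | 0, _ => []
  | fuel + 1, n =>
    if PySem.Int.mod n 6 = 0 ∨ PySem.Int.mod n 6 = 4 then
      (PySem.List.pyRange 0 n 1).foldl
        (fun acc i => acc ++ [if 2*i < n then 2*i + 1 else PySem.Int.mod (2*i) n]) []
    else if PySem.Int.mod n 6 = 2 then
      (PySem.List.pyRange 0 n 1).foldl
        (fun acc i => acc ++ [if 2*i < n then PySem.Int.mod (2*i + 3) n else PySem.Int.mod (2*i - 2) n]) []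
    else
      positionsFuel fuel (n - 1) ++ [n - 1]

def positions (n : Int) : List Int := positionsFuel 2 n

-- ===== PORT B =====
def positions_alt (n : Int) : List Int :=
  let m := if PySem.Int.mod n 2 = 0 then n else n - 1
  let odds := PySem.List.pyRange 1 m 2
  let evens := PySem.List.pyRange 0 m 2
  let odds' := if PySem.Int.mod m 6 = 2 then
      PySem.List.slice odds (some 1) none ++ PySem.List.slice odds none (some 1)
    else odds
  let evens' := if PySem.Int.mod m 6 = 2 then
      PySem.List.slice evens (some (-1)) none ++ PySem.List.slice evens none (some (-1))
    else evens
  let pos := odds' ++ evens'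
  if m ≠ n then pos ++ [m] else pos

-- ===== PRECONDITION & SPEC =====
def Spec_positions (n : Int) (out : List Int) : Prop := out = positions_alt n
instance (n : Int) (out : List Int) : Decidable (Spec_positions n out) := by unfold Spec_positions; infer_instance

-- ===== CLAIM (what is proved, stated in full; the proofs are below) =====
def Claim_equal_positions : Prop := ∀ (n : Int), Dom_positions n → Spec_positions n (positions n)

-- ===== LEMMAS AND PROOFS =====

theorem emod_add_self (x y : Int) (h0 : 0 ≤ x) (h1 : x < y) : (x + y) % y = x := by
  rw [show x + y = x + y*1 by ring, Int.add_mul_emod_self_left, Int.emod_eq_of_lt h0 h1]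

-- the even base with residue 0 or 4 mod 6: A's loop is the odd rows then the even rows
theorem caseA_eq (m : Int) (hm2 : m % 2 = 0) :
    (PySem.List.pyRange 0 m 1).foldl
        (fun acc i => acc ++ [if 2*i < m then 2*i + 1 else PySem.Int.mod (2*i) m]) []
      = PySem.List.pyRange 1 m 2 ++ PySem.List.pyRange 0 m 2 := by
  rw [PySem.List.foldl_append_singleton_eq_map]
  by_cases hpos : 0 < m
  · obtain ⟨h, rfl⟩ : ∃ h : Nat, m = 2*(h:Int) := ⟨(m/2).toNat, by omega⟩
    have hh : 0 < h := by omega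
    rw [PySem.List.pyRange_one, PySem.List.pyRange_of_pos 1 _ (by norm_num),
        PySem.List.pyRange_of_pos 0 _ (by norm_num)]
    have e0 : (2*(h:Int) - 0).toNat = h + h := by omega
    have e1 : ((2*(h:Int) - 1 + 2 - 1)/2).toNat = h := by omega
    have e2 : ((2*(h:Int) - 0 + 2 - 1)/2).toNat = h := by omega
    rw [e0, if_pos (by omega : (1:Int) < 2*h), if_pos (by omega : (0:Int) < 2*h), e1, e2]
    simp only [List.nil_append, List.map_map]
    rw [List.range_add]
    simp only [List.map_append, List.map_map]
    congr 1
    · refine List.map_congr_left fun k hk => ?_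
      have hk' : k < h := List.mem_range.mp hk
      simp only [Function.comp]
      rw [if_pos (by omega)]
      ring
    · refine List.map_congr_left fun k hk => ?_
      have hk' : k < h := List.mem_range.mp hk
      simp only [Function.comp]
      rw [if_neg (by push_cast; omega), PySem.Int.mod_eq_emod_of_pos (by omega)]
      push_cast
      rw [show (2:Int)*(0+((h:Int)+(k:Int))) = 2*(k:Int) + 2*(h:Int) by ring,
          emod_add_self _ _ (by positivity) (by omega)]
      ring
  · rw [PySem.List.pyRange_one_eq_nil (by omega),
        PySem.List.pyRange_of_pos 1 _ (by norm_num), PySem.List.pyRange_of_pos 0 _ (by norm_num),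
        if_neg (by omega : ¬ (1:Int) < m), if_neg (by omega : ¬ (0:Int) < m)]
    simp

-- the even base with residue 2 mod 6: A's loop is the rotated odd rows then the rotated even rows
theorem case2_eq (m : Int) (hm6 : m % 6 = 2) :
    (PySem.List.pyRange 0 m 1).foldl
        (fun acc i => acc ++ [if 2*i < m then PySem.Int.mod (2*i + 3) m else PySem.Int.mod (2*i - 2) m]) []
      = (PySem.List.slice (PySem.List.pyRange 1 m 2) (some 1) none
          ++ PySem.List.slice (PySem.List.pyRange 1 m 2) none (some 1))
        ++ (PySem.List.slice (PySem.List.pyRange 0 m 2) (some (-1)) none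
          ++ PySem.List.slice (PySem.List.pyRange 0 m 2) none (some (-1))) := by
  rw [PySem.List.foldl_append_singleton_eq_map]
  by_cases hpos : 0 < m
  · obtain ⟨g, rfl⟩ : ∃ g : Nat, m = 2*((g:Int)+1) := ⟨(m/2 - 1).toNat, by omega⟩
    rw [PySem.List.pyRange_one, PySem.List.pyRange_of_pos 1 _ (by norm_num),
        PySem.List.pyRange_of_pos 0 _ (by norm_num)]
    have e0 : (2*((g:Int)+1) - 0).toNat = (g + 1) + (g + 1) := by omega
    have e1 : ((2*((g:Int)+1) - 1 + 2 - 1)/2).toNat = g + 1 := by omega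
    have e2 : ((2*((g:Int)+1) - 0 + 2 - 1)/2).toNat = g + 1 := by omega
    rw [e0, if_pos (by omega : (1:Int) < 2*((g:Int)+1)), if_pos (by omega : (0:Int) < 2*((g:Int)+1)),
        e1, e2]
    rw [PySem.List.slice_from _ (by norm_num : (0:Int) ≤ 1),
        PySem.List.slice_to _ (by norm_num : (0:Int) ≤ 1),
        PySem.List.slice_from_neg_one, PySem.List.slice_to_neg_one]
    simp only [List.nil_append, List.map_map]
    rw [List.range_add]
    simp only [List.map_append, List.map_map]
    congr 1
    · -- first half = odds rotated left by one
      conv_rhs => rw [List.range_succ_eq_map]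
      conv_lhs => rw [List.range_succ]
      simp only [List.map_append, List.map_cons, List.map_nil, List.map_map,
        Int.toNat_one, List.drop_succ_cons, List.drop_zero, List.take_succ_cons, List.take_zero]
      congr 1
      · refine List.map_congr_left fun k hk => ?_
        have hk' : k < g := List.mem_range.mp hk
        simp only [Function.comp, Nat.succ_eq_add_one]
        rw [if_pos (by omega), PySem.Int.mod_eq_emod_of_pos (by omega)]
        push_cast
        rw [Int.emod_eq_of_lt (by positivity) (by omega)]
        ring
      · simp only [Function.comp]
        rw [if_pos (by omega), PySem.Int.mod_eq_emod_of_pos (by omega)]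
        push_cast
        rw [show (2:Int)*(0+(g:Int))+3 = 1 + 2*((g:Int)+1) by ring,
            emod_add_self _ _ (by norm_num) (by omega)]
    · -- second half = evens rotated right by one
      conv_lhs => rw [List.range_succ_eq_map]
      conv_rhs => rw [List.range_succ]
      simp only [List.map_append, List.map_cons, List.map_nil, List.map_map]
      have len1 : (List.map (fun (k:Nat) => 0 + 2*(k:Int)) (List.range g) ++ [0 + 2*(g:Int)]).length - 1
          = (List.map (fun (k:Nat) => 0 + 2*(k:Int)) (List.range g)).length := by simp
      rw [len1, List.drop_left, List.dropLast_concat, List.singleton_append]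
      congr 1
      · simp only [Function.comp]
        rw [if_neg (by push_cast; omega), PySem.Int.mod_eq_emod_of_pos (by omega)]
        push_cast
        rw [show (2:Int)*(0+((g:Int)+1+0))-2 = 2*(g:Int) by ring,
            Int.emod_eq_of_lt (by positivity) (by omega)]
        ring
      · refine List.map_congr_left fun k hk => ?_
        have hk' : k < g := List.mem_range.mp hk
        simp only [Function.comp, Nat.succ_eq_add_one]
        rw [if_neg (by push_cast; omega), PySem.Int.mod_eq_emod_of_pos (by omega)]
        push_cast
        rw [show (2:Int)*(0+((g:Int)+1+((k:Int)+1)))-2 = 2*(k:Int) + 2*((g:Int)+1) by ring,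
            emod_add_self _ _ (by positivity) (by omega)]
        ring
  · rw [PySem.List.pyRange_one_eq_nil (by omega),
        PySem.List.pyRange_of_pos 1 _ (by norm_num), PySem.List.pyRange_of_pos 0 _ (by norm_num),
        if_neg (by omega : ¬ (1:Int) < m), if_neg (by omega : ¬ (0:Int) < m)]
    simp [PySem.List.slice]

theorem positions_eq (n : Int) : positions n = positions_alt n := by
  have h6 : PySem.Int.mod n 6 = n % 6 := PySem.Int.mod_eq_emod_of_pos (by norm_num)
  have h6' : PySem.Int.mod (n - 1) 6 = (n - 1) % 6 := PySem.Int.mod_eq_emod_of_pos (by norm_num)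
  have h2 : PySem.Int.mod n 2 = n % 2 := PySem.Int.mod_eq_emod_of_pos (by norm_num)
  rcases (by omega : n % 6 = 0 ∨ n % 6 = 1 ∨ n % 6 = 2 ∨ n % 6 = 3 ∨ n % 6 = 4 ∨ n % 6 = 5)
    with h | h | h | h | h | h
  · rw [positions, positionsFuel]
    rw [if_pos (by rw [h6, h]; left; rfl), caseA_eq n (by omega)]
    simp [positions_alt, h, (by omega : n % 2 = 0)]
  · have e : (n - 1) % 6 = 0 := by omega
    rw [positions, positionsFuel, if_neg (by rw [h6, h]; norm_num), if_neg (by rw [h6, h]; norm_num),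
        positionsFuel, if_pos (by rw [h6', e]; left; rfl), caseA_eq (n-1) (by omega)]
    simp [positions_alt, e, (by omega : n % 2 = 1)]
  · rw [positions, positionsFuel]
    rw [if_neg (by rw [h6, h]; norm_num), if_pos (by rw [h6, h]), case2_eq n (by omega)]
    simp [positions_alt, h, (by omega : n % 2 = 0)]
  · have e : (n - 1) % 6 = 2 := by omega
    rw [positions, positionsFuel, if_neg (by rw [h6, h]; norm_num), if_neg (by rw [h6, h]; norm_num),
        positionsFuel, if_neg (by rw [h6', e]; norm_num), if_pos (by rw [h6', e]),
        case2_eq (n-1) (by omega)]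
    simp [positions_alt, e, (by omega : n % 2 = 1)]
  · rw [positions, positionsFuel]
    rw [if_pos (by rw [h6, h]; right; rfl), caseA_eq n (by omega)]
    simp [positions_alt, h, (by omega : n % 2 = 0)]
  · have e : (n - 1) % 6 = 4 := by omega
    rw [positions, positionsFuel, if_neg (by rw [h6, h]; norm_num), if_neg (by rw [h6, h]; norm_num),
        positionsFuel, if_pos (by rw [h6', e]; right; rfl), caseA_eq (n-1) (by omega)]
    simp [positions_alt, e, (by omega : n % 2 = 1)]

-- ===== VERDICT (by name: the statement is the Claim_ definition above) =====
theorem positions_spec : Claim_equal_positions := by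
  intro n _
  exact positions_eq n
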